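-- pv_equiv track=rewrite | github.com/johnnyczhong/httpTesting | httpTestingFunctions.py | generateMetadataCombinations
-- ===== SOURCE A (Python) =====
-- import itertools
--
-- def generateMetadataCombinations(mdtHash):
--   combinationsList = []
--   for k, v in mdtHash.items():
--     innerList = []
--     for i in v:
--       tag = '<{0}> {1} </{0}>'.format(k, i)
--       innerList.append(tag)
--     combinationsList.append(innerList)
--
--   # takes list of raw data and generates combinations
--   return [ x for x in itertools.product (*combinationsList) ]
-- ===== SOURCE B (Python) =====
-- def generateMetadataCombinations(mdtHash):
--   # iterative accumulation of the Cartesian product instead of itertools.product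
--   result = [()]
--   for k, v in mdtHash.items():
--     pool = ['<{0}> {1} </{0}>'.format(k, i) for i in v]
--     result = [prev + (tag,) for prev in result for tag in pool]
--   return result
-- ===== Notes on version B (the rewrite author's own statement) =====
-- stated objective: alternative
-- what changed: Replaces the two-phase build (per-key tag lists, then itertools.product) by a single left-to-right accumulation that extends each partial tuple with every tag of the next key, never materialising the list-of-pools for product.
import Mathlib
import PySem

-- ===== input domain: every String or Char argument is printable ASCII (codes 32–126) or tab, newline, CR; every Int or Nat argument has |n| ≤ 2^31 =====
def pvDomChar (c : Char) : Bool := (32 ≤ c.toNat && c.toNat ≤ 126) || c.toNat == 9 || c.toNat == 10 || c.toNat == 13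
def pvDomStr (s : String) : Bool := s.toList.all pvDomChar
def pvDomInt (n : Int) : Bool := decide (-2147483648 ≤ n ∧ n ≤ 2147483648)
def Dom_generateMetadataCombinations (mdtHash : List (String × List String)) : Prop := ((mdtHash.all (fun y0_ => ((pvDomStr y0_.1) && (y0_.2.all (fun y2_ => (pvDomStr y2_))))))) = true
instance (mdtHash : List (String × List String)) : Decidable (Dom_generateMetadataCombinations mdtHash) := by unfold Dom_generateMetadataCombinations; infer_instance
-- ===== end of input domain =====

-- B replaces the per-key tag lists + itertools.product by a single accumulation of partial tuples (alternative decomposition, same cost).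

-- ===== PORT A =====
-- itertools.product(*pools) over the list of pools, first pool varying slowest
def pvProductA : List (List String) → List (List String)
  | [] => [[]]
  | p :: ps => p.flatMap (fun x => (pvProductA ps).map (fun rest => x :: rest))

def generateMetadataCombinations (mdtHash : List (String × List String)) : List (List String) :=
  let combinationsList :=
    mdtHash.foldl (fun combinationsList kv =>
      let innerList :=
        kv.2.foldl (fun innerList i =>
          innerList ++ ["<" ++ kv.1 ++ "> " ++ i ++ " </" ++ kv.1 ++ ">"]) []
      combinationsList ++ [innerList]) []
  pvProductA combinationsList

-- ===== PORT B =====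
def generateMetadataCombinations_alt (mdtHash : List (String × List String)) : List (List String) :=
  mdtHash.foldl (fun result kv =>
    let pool := kv.2.map (fun i => "<" ++ kv.1 ++ "> " ++ i ++ " </" ++ kv.1 ++ ">")
    result.flatMap (fun prev => pool.map (fun tag => prev ++ [tag]))) [[]]

-- ===== PRECONDITION & SPEC =====
def Spec_generateMetadataCombinations (mdtHash : List (String × List String)) (out : List (List String)) : Prop := out = generateMetadataCombinations_alt mdtHash
instance (mdtHash : List (String × List String)) (out : List (List String)) : Decidable (Spec_generateMetadataCombinations mdtHash out) := by unfold Spec_generateMetadataCombinations; infer_instance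

-- ===== CLAIM (what is proved, stated in full; the proofs are below) =====
def Claim_equal_generateMetadataCombinations : Prop := ∀ (mdtHash : List (String × List String)), Dom_generateMetadataCombinations mdtHash → Spec_generateMetadataCombinations mdtHash (generateMetadataCombinations mdtHash)

-- ===== LEMMAS AND PROOFS =====

-- B's accumulating fold computes A's recursive product of the per-key pools, up to an initial prefix set.
theorem foldl_extend_eq_product (l : List (String × List String)) (r : List (List String)) :
    l.foldl (fun result kv =>
        result.flatMap (fun prev =>
          (kv.2.map (fun i => "<" ++ kv.1 ++ "> " ++ i ++ " </" ++ kv.1 ++ ">")).map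
            (fun tag => prev ++ [tag]))) r
      = r.flatMap (fun prev =>
          (pvProductA (l.map (fun kv =>
            kv.2.map (fun i => "<" ++ kv.1 ++ "> " ++ i ++ " </" ++ kv.1 ++ ">")))).map
              (fun rest => prev ++ rest)) := by
  induction l generalizing r with
  | nil => simp [pvProductA]
  | cons kv ps ih =>
      simp only [List.foldl_cons, ih, List.map_cons, pvProductA]
      simp [List.flatMap_assoc, List.flatMap_map, List.map_flatMap, List.map_map, Function.comp_def]

theorem generateMetadataCombinations_eq (mdtHash : List (String × List String)) :
    generateMetadataCombinations mdtHash = generateMetadataCombinations_alt mdtHash := by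
  show pvProductA
      (mdtHash.foldl (fun combinationsList kv =>
        combinationsList ++
          [kv.2.foldl (fun innerList i =>
            innerList ++ ["<" ++ kv.1 ++ "> " ++ i ++ " </" ++ kv.1 ++ ">"]) []]) [])
    = mdtHash.foldl (fun result kv =>
        result.flatMap (fun prev =>
          (kv.2.map (fun i => "<" ++ kv.1 ++ "> " ++ i ++ " </" ++ kv.1 ++ ">")).map
            (fun tag => prev ++ [tag]))) [[]]
  have hA :
      mdtHash.foldl (fun cl kv =>
        cl ++ [kv.2.foldl (fun il i => il ++ ["<" ++ kv.1 ++ "> " ++ i ++ " </" ++ kv.1 ++ ">"]) []]) []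
      = mdtHash.map (fun kv => kv.2.map (fun i => "<" ++ kv.1 ++ "> " ++ i ++ " </" ++ kv.1 ++ ">")) := by
    have h0 := PySem.List.foldl_append_singleton_eq_map
      (fun kv : String × List String =>
        kv.2.foldl (fun il i => il ++ ["<" ++ kv.1 ++ "> " ++ i ++ " </" ++ kv.1 ++ ">"]) []) mdtHash []
    simp only [List.nil_append] at h0
    rw [h0]
    exact List.map_congr_left (fun kv _ => by
      simpa using PySem.List.foldl_append_singleton_eq_map
        (fun i => "<" ++ kv.1 ++ "> " ++ i ++ " </" ++ kv.1 ++ ">") kv.2 [])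
  rw [hA, foldl_extend_eq_product]
  simp

-- ===== VERDICT (by name: the statement is the Claim_ definition above) =====
theorem generateMetadataCombinations_spec : Claim_equal_generateMetadataCombinations := by
  intro mdtHash _
  exact generateMetadataCombinations_eq mdtHash
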